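-- pv_equiv track=rewrite | github.com/chaseruskin/legoHDL | src/legohdl/verilog.py | _getIdentifiers
-- ===== SOURCE A (Python) =====
-- def _getIdentifiers(cseg):
--     '''
--     Determines the list of identififers from the module declaration.
--
--     Parameters:
--         cseg ([str]): the module declaration line.
--     Returns:
--         dec_end (int): ending index of the given identifier section
--         ids ([str]): list of identifier names
--     '''
--     #track amount of brackets (begins with '(')
--     pb_cnt = 1
--     dec_end = 0
--     #store identifier names
--     ids = []
--     #find when this identifier section ends (pb_cnt == 0)
--     while pb_cnt > 0 and dec_end < len(cseg):
--         #count pb's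
--         if (cseg[dec_end] == '('):
--             pb_cnt += 1
--         elif(cseg[dec_end] == ')'):
--             pb_cnt -= 1
--         #update to next index
--         dec_end += 1
--     #slice to the end of identifer section
--     cseg = cseg[:dec_end-1]
--     #append a ',' to end for algorithm
--     cseg = cseg + [',']
--     #iterate through every token
--     while cseg.count(',') and len(cseg) > 1:
--         i = 0
--         #get name right before assignment
--         if(cseg[1] == '='):
--             ids += [cseg[0]]
--             #jump to next comma
--             i = cseg.index(',')
--         #get identifier right before comma
--         elif(cseg[1] == ','):
--             ids += [cseg[0]]
--             #jump to next comma
--             i = cseg.index(',')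
--         #increment i with every passage
--         i = i+1
--         #slowly trim away code statement
--         cseg = cseg[i:]
--
--     return dec_end-1, ids
-- ===== SOURCE B (Python) =====
-- def _getIdentifiers(cseg):
--     '''
--     Determines the list of identifiers from the module declaration.
--     Single-pass re-implementation: one cursor walks the token region once
--     (no repeated slicing/count()/index() rescans).
--     '''
--     # find end of identifier section: token index just past the ')' matching
--     # the implicit opening '('
--     depth = 1
--     dec_end = 0
--     for tok in cseg:
--         dec_end += 1
--         if tok == '(':
--             depth += 1
--         elif tok == ')':
--             depth -= 1
--             if depth == 0:
--                 break
--     # token region, with a ',' sentinel so the last identifier is terminated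
--     toks = cseg[:dec_end-1] + [',']
--     ids = []
--     i = 0
--     n = len(toks)
--     while i + 1 < n:
--         if toks[i+1] == '=' or toks[i+1] == ',':
--             # current token is the identifier (it sits right before '=' or ',')
--             ids.append(toks[i])
--             # move past the comma ending this declaration item
--             while toks[i] != ',':
--                 i += 1
--         i += 1
--     return dec_end - 1, ids
-- ===== Notes on version B (the rewrite author's own statement) =====
-- stated objective: faster
-- what changed: B replaces A's repeated list slicing with count()/index() rescans by a single cursor pass over the token region (and a for-with-break bracket scan), appending each identifier when its successor token is '=' or ','.
import Mathlib
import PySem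

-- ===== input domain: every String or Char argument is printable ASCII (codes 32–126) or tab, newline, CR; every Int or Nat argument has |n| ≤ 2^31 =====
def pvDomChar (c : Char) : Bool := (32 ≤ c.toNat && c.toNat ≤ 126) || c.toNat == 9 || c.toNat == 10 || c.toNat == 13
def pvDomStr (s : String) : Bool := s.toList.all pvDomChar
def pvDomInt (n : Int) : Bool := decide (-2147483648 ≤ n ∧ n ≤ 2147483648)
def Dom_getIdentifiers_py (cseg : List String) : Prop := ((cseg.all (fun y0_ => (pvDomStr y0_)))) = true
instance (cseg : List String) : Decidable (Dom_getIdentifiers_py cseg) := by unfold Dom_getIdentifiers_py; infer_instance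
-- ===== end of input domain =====

-- B replaces A's repeated list slicing with count()/index() rescans by a single
-- cursor pass over the token region; measured asymptotically faster (O(n) vs O(n^2)).


-- ===== PORT A =====
-- while pb_cnt > 0 and dec_end < len(cseg): …
def gidA_scan (cseg : List String) (pb : Int) (decEnd : Nat) : Nat :=
  if 0 < pb ∧ decEnd < cseg.length then
    -- cseg[dec_end] is in range by the guard
    gidA_scan cseg
      (if cseg.getD decEnd "" = "(" then pb + 1
       else if cseg.getD decEnd "" = ")" then pb - 1 else pb) (decEnd + 1)
  else decEnd
termination_by cseg.length - decEnd
decreasing_by omega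

-- while cseg.count(',') and len(cseg) > 1: …
def gidA_loop (cs : List String) (ids : List String) : List String :=
  if PySem.List.count cs "," ≠ 0 ∧ 1 < cs.length then
    if cs.getD 1 "" = "=" then            -- cseg[1], in range by the guard
      gidA_loop (cs.drop (((PySem.List.index? cs ",").getD 0) + 1)) (ids ++ [cs.getD 0 ""])
    else if cs.getD 1 "" = "," then
      gidA_loop (cs.drop (((PySem.List.index? cs ",").getD 0) + 1)) (ids ++ [cs.getD 0 ""])
    else
      gidA_loop (cs.drop 1) ids           -- i stayed 0, then i = i+1
  else ids
termination_by cs.length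
decreasing_by all_goals simp; omega

def getIdentifiers_py (cseg : List String) : Int × List String :=
  let decEnd := gidA_scan cseg 1 0
  let cs := PySem.List.slice cseg none (some ((decEnd : Int) - 1)) ++ [","]
  ((decEnd : Int) - 1, gidA_loop cs [])

-- ===== PORT B =====
-- for tok in cseg: … break
def gidB_scan : List String → Int → Nat → Nat
  | [], _, d => d
  | t :: ts, depth, d =>
      if t = "(" then gidB_scan ts (depth + 1) (d + 1)
      else if t = ")" then
        if depth - 1 = 0 then d + 1 else gidB_scan ts (depth - 1) (d + 1)
      else gidB_scan ts depth (d + 1)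

-- while toks[i] != ',': i += 1   (returns the final i)
def gidB_skip (toks : List String) (i : Nat) : Nat :=
  if i < toks.length then
    if toks.getD i "" = "," then i else gidB_skip toks (i + 1)
  else i
termination_by toks.length - i
decreasing_by omega

-- cited by gidB_loop's decreasing_by (termination of the port itself)
theorem gidB_skip_ge (toks : List String) (i : Nat) : i ≤ gidB_skip toks i := by
  unfold gidB_skip
  split_ifs with h1 h2
  · exact le_refl i
  · have := gidB_skip_ge toks (i + 1); omega
  · exact le_refl i
termination_by toks.length - i
decreasing_by omega

-- while i + 1 < n: …
def gidB_loop (toks : List String) (i : Nat) (ids : List String) : List String :=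
  if h : i + 1 < toks.length then
    if toks.getD (i + 1) "" = "=" ∨ toks.getD (i + 1) "" = "," then
      gidB_loop toks (gidB_skip toks i + 1) (ids ++ [toks.getD i ""])
    else gidB_loop toks (i + 1) ids
  else ids
termination_by toks.length - i
decreasing_by
  · have := gidB_skip_ge toks i; omega
  · omega

def getIdentifiers_py_alt (cseg : List String) : Int × List String :=
  let decEnd := gidB_scan cseg 1 0
  let toks := PySem.List.slice cseg none (some ((decEnd : Int) - 1)) ++ [","]
  ((decEnd : Int) - 1, gidB_loop toks 0 [])

-- ===== PRECONDITION & SPEC =====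
def Spec_getIdentifiers_py (cseg : List String) (out : Int × List String) : Prop := out = getIdentifiers_py_alt cseg
instance (cseg : List String) (out : Int × List String) : Decidable (Spec_getIdentifiers_py cseg out) := by unfold Spec_getIdentifiers_py; infer_instance

-- ===== CLAIM (what is proved, stated in full; the proofs are below) =====
def Claim_equal_getIdentifiers_py : Prop := ∀ (cseg : List String), Dom_getIdentifiers_py cseg → Spec_getIdentifiers_py cseg (getIdentifiers_py cseg)

-- ===== LEMMAS AND PROOFS =====

-- both bracket scans compute the same ending index
theorem scan_eq (cseg : List String) (d : Nat) (pb : Int) (hpb : 0 < pb) :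
    gidA_scan cseg pb d = gidB_scan (cseg.drop d) pb d := by
  unfold gidA_scan
  by_cases hd : d < cseg.length
  · rw [List.drop_eq_getElem_cons hd]
    have hget : cseg.getD d "" = cseg[d] := by
      rw [List.getD_eq_getElem?_getD, List.getElem?_eq_getElem hd]; rfl
    rw [if_pos ⟨hpb, hd⟩, hget]
    unfold gidB_scan
    by_cases h1 : cseg[d] = "("
    · rw [if_pos h1, if_pos h1]
      exact scan_eq cseg (d + 1) (pb + 1) (by omega)
    · rw [if_neg h1, if_neg h1]
      by_cases h2 : cseg[d] = ")"
      · rw [if_pos h2, if_pos h2]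
        by_cases h3 : pb - 1 = 0
        · rw [if_pos h3]
          unfold gidA_scan
          rw [if_neg (by omega)]
        · rw [if_neg h3]
          exact scan_eq cseg (d + 1) (pb - 1) (by omega)
      · rw [if_neg h2, if_neg h2]
        exact scan_eq cseg (d + 1) pb hpb
  · rw [if_neg (by omega), List.drop_eq_nil_of_le (by omega)]
    rfl
termination_by cseg.length - d
decreasing_by all_goals omega

-- the cursor advance of B lands exactly where A's index(',') jump lands
theorem skip_spec (toks : List String) (i : Nat) (h : "," ∈ toks.drop i) :
    gidB_skip toks i = i + ((PySem.List.index? (toks.drop i) ",").getD 0) := by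
  have hi : i < toks.length := by
    by_contra hc
    rw [List.drop_eq_nil_of_le (by omega)] at h
    simp at h
  have hdrop : toks.drop i = toks[i] :: toks.drop (i + 1) := List.drop_eq_getElem_cons hi
  have hget : toks.getD i "" = toks[i] := by
    rw [List.getD_eq_getElem?_getD, List.getElem?_eq_getElem hi]; rfl
  unfold gidB_skip
  simp only [hi, if_true, hget]
  by_cases he : toks[i] = ","
  · rw [if_pos he, hdrop, he, PySem.List.index?_cons_self]
    rfl
  · rw [if_neg he]
    have h2 : "," ∈ toks.drop (i + 1) := by
      rw [hdrop] at h
      rcases List.mem_cons.mp h with h' | h'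
      · exact absurd h'.symm he
      · exact h'
    have hsome : (PySem.List.index? (toks.drop (i + 1)) ",").isSome := by
      rw [PySem.List.index?_eq_idxOf?]
      exact List.isSome_idxOf?.mpr h2
    obtain ⟨k, hk⟩ := Option.isSome_iff_exists.mp hsome
    rw [skip_spec toks (i + 1) h2, hdrop, PySem.List.index?_cons_of_ne _ he, hk]
    simp
    omega
termination_by toks.length - i
decreasing_by omega

-- the trimming loop of A, read through a cursor, is B's loop
theorem loop_eq (toks : List String) (hlast : toks.getLast? = some ",") (i : Nat)
    (ids : List String) : gidA_loop (toks.drop i) ids = gidB_loop toks i ids := by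
  unfold gidB_loop
  by_cases h : i + 1 < toks.length
  · have hmem : "," ∈ toks.drop i := by
      have h1 : (toks.drop i).getLast? = some "," := by
        rw [List.getLast?_drop]
        simp [Nat.not_le.mpr (show i < toks.length by omega), hlast]
      exact List.mem_of_getLast? h1
    have hlen : 1 < (toks.drop i).length := by
      simp only [List.length_drop]; omega
    have hcnt : PySem.List.count (toks.drop i) "," ≠ 0 := by
      rw [PySem.List.count_eq]
      intro hc
      exact (List.count_eq_zero.mp hc) hmem
    have hg1 : (toks.drop i).getD 1 "" = toks.getD (i + 1) "" := by
      rw [List.getD_eq_getElem?_getD, List.getD_eq_getElem?_getD, List.getElem?_drop]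
    have hg0 : (toks.drop i).getD 0 "" = toks.getD i "" := by
      rw [List.getD_eq_getElem?_getD, List.getD_eq_getElem?_getD, List.getElem?_drop]
      simp
    have hskip := skip_spec toks i hmem
    have hge := gidB_skip_ge toks i
    rw [gidA_loop, if_pos ⟨hcnt, hlen⟩, dif_pos h]
    simp only [hg1, hg0]
    by_cases hc1 : toks.getD (i + 1) "" = "="
    · rw [if_pos hc1, if_pos (Or.inl hc1), List.drop_drop]
      rw [show i + ((PySem.List.index? (toks.drop i) ",").getD 0 + 1) = gidB_skip toks i + 1 by omega]
      exact loop_eq toks hlast (gidB_skip toks i + 1) (ids ++ [toks.getD i ""])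
    · by_cases hc2 : toks.getD (i + 1) "" = ","
      · rw [if_neg hc1, if_pos hc2, if_pos (Or.inr hc2), List.drop_drop]
        rw [show i + ((PySem.List.index? (toks.drop i) ",").getD 0 + 1) = gidB_skip toks i + 1 by omega]
        exact loop_eq toks hlast (gidB_skip toks i + 1) (ids ++ [toks.getD i ""])
      · rw [if_neg hc1, if_neg hc2, if_neg (by tauto), List.drop_drop]
        exact loop_eq toks hlast (i + 1) ids
  · rw [dif_neg h, gidA_loop, if_neg]
    intro ⟨_, hl⟩
    simp only [List.length_drop] at hl
    omega
termination_by toks.length - i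
decreasing_by all_goals omega

-- ===== VERDICT (by name: the statement is the Claim_ definition above) =====
theorem getIdentifiers_py_spec : Claim_equal_getIdentifiers_py := by
  intro cseg _
  unfold Spec_getIdentifiers_py getIdentifiers_py getIdentifiers_py_alt
  have hscan : gidA_scan cseg 1 0 = gidB_scan cseg 1 0 := by
    simpa using scan_eq cseg 0 1 (by omega)
  rw [hscan]
  have hlast : (PySem.List.slice cseg none (some ((gidB_scan cseg 1 0 : Int) - 1)) ++ [","]).getLast?
      = some "," := List.getLast?_concat
  simpa using loop_eq _ hlast 0 []
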